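-- pv_equiv track=rewrite | github.com/kimsungmin1011/Algorithm | 프로그래머스/2/42626. 더 맵게/더 맵게.py | solution
-- ===== SOURCE A (Python) =====
-- import heapq
--
-- def solution(scoville, K):
--     heapq.heapify(scoville)  # 리스트를 min heap으로 변환
--     answer = 0
--
--     while len(scoville) >= 2 and scoville[0] < K:
--         first = heapq.heappop(scoville)
--         second = heapq.heappop(scoville)
--         mixed = first + second * 2
--         heapq.heappush(scoville, mixed)
--         answer += 1
--
--     # 마지막 검사
--     if scoville[0] >= K:
--         return answer
--     else:
--         return -1
-- ===== SOURCE B (Python) =====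
-- def solution(scoville, K):
--     # Two-pointer merge instead of a heap: sort once; originals are read off p
--     # by pointer i, mixes are appended (in nondecreasing order) to q and read
--     # off by pointer j; the overall minimum is always at one of the two pointers.
--     p = sorted(scoville)
--     q = []
--
--     def pop_smallest(i, j):
--         if i < len(p) and (j >= len(q) or p[i] <= q[j]):
--             return p[i], i + 1, j
--         return q[j], i, j + 1
--
--     i = j = 0
--     answer = 0
--     while (len(p) - i) + (len(q) - j) >= 2:
--         first, i, j = pop_smallest(i, j)
--         if first >= K:
--             return answer
--         second, i, j = pop_smallest(i, j)
--         q.append(first + second * 2)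
--         answer += 1
--     rest = p[i:] + q[j:]
--     return answer if rest[0] >= K else -1
-- ===== Notes on version B (the rewrite author's own statement) =====
-- stated objective: alternative
-- what changed: Replaces the heap with a two-pointer merge: sort once, keep an append-only list of mixed values (produced in an order that provably keeps it sorted), and take each minimum as the smaller of the two front pointers - no heap sift or sorted-position insertion ever happens.
import Mathlib
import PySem

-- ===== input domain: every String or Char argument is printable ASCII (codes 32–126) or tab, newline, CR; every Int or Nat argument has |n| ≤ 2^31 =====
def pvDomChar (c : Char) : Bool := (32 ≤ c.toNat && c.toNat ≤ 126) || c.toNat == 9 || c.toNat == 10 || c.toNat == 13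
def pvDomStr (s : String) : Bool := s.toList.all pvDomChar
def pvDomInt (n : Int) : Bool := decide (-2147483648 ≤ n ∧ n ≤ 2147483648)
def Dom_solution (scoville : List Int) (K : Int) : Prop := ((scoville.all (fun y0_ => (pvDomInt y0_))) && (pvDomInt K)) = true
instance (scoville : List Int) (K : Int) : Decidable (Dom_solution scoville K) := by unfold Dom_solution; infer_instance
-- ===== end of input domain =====

-- B replaces A's heap by a two-pointer merge over a once-sorted list plus an append-only
-- queue of mixes; return values agree, only A mutates the caller's list in place.

-- ===== PORT A =====
-- A's heapq calls are ported by their value semantics on the heap's multiset of elements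
-- (exact for everything A observes): heappop removes a minimal element, heappush appends,
-- and scoville[0] on a min-heap is its minimum.
def loopA (s : List Int) (K ans : Int) : Int :=
  if _h2 : 2 ≤ s.length then
    match hm : PySem.List.min? s (fun x => x) with
    | none => -1      -- unreachable: s is nonempty here
    | some first =>
      if first < K then
        match hm2 : PySem.List.min? (s.erase first) (fun x => x) with
        | none => -1  -- unreachable: s.erase first is nonempty here
        | some second =>
          loopA (((s.erase first).erase second) ++ [first + second * 2]) K (ans + 1)
      else  -- loop exits; final check: scoville[0] = heap minimum
        if first ≥ K then ans else -1
  else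
    match PySem.List.min? s (fun x => x) with
    | some first => if first ≥ K then ans else -1
    | none => -1      -- scoville[0] on [] raises IndexError; excluded by Pre_solution
termination_by s.length
decreasing_by
  have h1 : first ∈ s := PySem.List.min?_mem hm
  have h2' : second ∈ s.erase first := PySem.List.min?_mem hm2
  have e1 := List.length_erase_of_mem h1
  have e2 := List.length_erase_of_mem h2'
  simp [e1, e2] at *
  omega

def solution (scoville : List Int) (K : Int) : Int :=
  loopA scoville K 0

-- ===== PORT B =====
-- p[i] / q[j] are read via getD; every access is guarded by the same bound check the
-- Python line makes (or by the loop guard), so the default is never consulted.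
def pick (p q : List Int) (i j : Nat) : Int × Nat × Nat :=
  if i < p.length ∧ (q.length ≤ j ∨ p.getD i 0 ≤ q.getD j 0)
  then (p.getD i 0, i + 1, j)
  else (q.getD j 0, i, j + 1)

-- termination facts for loopB, cited by its decreasing_by
theorem pick_sum (p q : List Int) (i j : Nat) :
    (pick p q i j).2.1 + (pick p q i j).2.2 = i + j + 1 := by
  unfold pick; split <;> simp <;> omega

theorem loopB_guard_bound (P Q i j : Nat)
    (h : 2 ≤ ((P : Int) - i) + ((Q : Int) - j)) : i + j + 2 ≤ P + Q := by omega

theorem loopB_dec (P Q i j : Nat) (r1 r2 : Int × Nat × Nat)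
    (h : 2 ≤ ((P : Int) - i) + ((Q : Int) - j))
    (e1 : r1.2.1 + r1.2.2 = i + j + 1)
    (e2 : r2.2.1 + r2.2.2 = r1.2.1 + r1.2.2 + 1) :
    P + (Q + 1) - r2.2.1 - r2.2.2 < P + Q - i - j := by
  have hX : i + j + 2 ≤ P + Q := loopB_guard_bound P Q i j h
  have e : r2.2.1 + r2.2.2 = i + j + 2 := by rw [e2, e1]
  rw [Nat.sub_sub, Nat.sub_sub, e, ← Nat.add_assoc]
  have h1 : P + Q + 1 - (i + j + 2) = P + Q - (i + j + 1) := Nat.succ_sub_succ _ _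
  rw [h1]
  exact Nat.sub_lt_sub_left
    (lt_of_lt_of_le (Nat.lt_add_of_pos_right (by decide)) hX) (Nat.lt_succ_self _)

def loopB (p q : List Int) (i j : Nat) (K ans : Int) : Int :=
  if hguard : 2 ≤ ((p.length : Int) - i) + ((q.length : Int) - j) then
    let r1 := pick p q i j          -- first, i, j = pop_smallest(i, j)
    if r1.1 ≥ K then ans
    else
      let r2 := pick p q r1.2.1 r1.2.2   -- second, i, j = pop_smallest(i, j)
      loopB p (q ++ [r1.1 + r2.1 * 2]) r2.2.1 r2.2.2 K (ans + 1)
  else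
    match p.drop i ++ q.drop j with  -- rest = p[i:] + q[j:]; rest[0]
    | a :: _ => if a ≥ K then ans else -1
    | [] => -1          -- rest[0] on [] raises IndexError; excluded by Pre_solution
termination_by p.length + q.length - i - j
decreasing_by
  simp only [List.length_append, List.length_cons, List.length_nil]
  exact loopB_dec p.length q.length i j r1 r2 hguard (pick_sum p q i j)
    (pick_sum p q r1.2.1 r1.2.2)

def solution_alt (scoville : List Int) (K : Int) : Int :=
  loopB (PySem.List.sorted scoville (fun x => x) false) [] 0 0 K 0

-- ===== PRECONDITION & SPEC =====
-- Pre_ excludes only the empty list, on which both A and B raise IndexError.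
def Pre_solution (scoville : List Int) (K : Int) : Prop := scoville ≠ []
instance (scoville : List Int) (K : Int) : Decidable (Pre_solution scoville K) := by unfold Pre_solution; infer_instance
def pvWitness_solution : List Int × Int := ([1, 2, 3, 9, 10, 12], 7)

def Spec_solution (scoville : List Int) (K : Int) (out : Int) : Prop := out = solution_alt scoville K
instance (scoville : List Int) (K : Int) (out : Int) : Decidable (Spec_solution scoville K out) := by unfold Spec_solution; infer_instance

-- ===== CLAIM (what is proved, stated in full; the proofs are below) =====
def Claim_equal_solution : Prop := ∀ (scoville : List Int) (K : Int), Dom_solution scoville K → Pre_solution scoville K → Spec_solution scoville K (solution scoville K)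

-- ===== LEMMAS AND PROOFS =====

-- proof-layer model of B's merge loop: the two pointer suffixes as explicit lists,
-- pop1 = "take the smaller front, p preferred"
def pop1 (p q : List Int) : Int × List Int × List Int :=
  match p, q with
  | a :: p', [] => (a, p', [])
  | [], b :: q' => (b, [], q')
  | a :: p', b :: q' => if a ≤ b then (a, p', b :: q') else (b, a :: p', q')
  | [], [] => (0, [], [])

theorem pop1_length (p q : List Int) (f : Int) (p1 q1 : List Int)
    (hne : 1 ≤ p.length + q.length) (heq : pop1 p q = (f, p1, q1)) :
    p1.length + q1.length + 1 = p.length + q.length := by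
  match p, q with
  | a :: p', [] =>
    simp only [pop1, Prod.mk.injEq] at heq
    obtain ⟨h0, h1, h2⟩ := heq; subst h1; subst h2; simp
  | [], b :: q' =>
    simp only [pop1, Prod.mk.injEq] at heq
    obtain ⟨h0, h1, h2⟩ := heq; subst h1; subst h2; simp
  | a :: p', b :: q' =>
    simp only [pop1] at heq
    split at heq <;> simp only [Prod.mk.injEq] at heq <;>
      obtain ⟨h0, h1, h2⟩ := heq <;> subst h1 <;> subst h2 <;> simp <;> omega
  | [], [] => simp at hne

def loopC (p q : List Int) (K ans : Int) : Int :=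
  if _h : 2 ≤ p.length + q.length then
    let r1 := pop1 p q        -- first = pop_smallest()
    if r1.1 ≥ K then ans
    else
      let r2 := pop1 r1.2.1 r1.2.2   -- second = pop_smallest()
      loopC r2.2.1 (r2.2.2 ++ [r1.1 + r2.1 * 2]) K (ans + 1)
  else
    match p ++ q with  -- rest = p + q; rest[0]
    | a :: _ => if a ≥ K then ans else -1
    | [] => -1          -- rest[0] on [] raises IndexError; excluded by Pre_solution
termination_by p.length + q.length
decreasing_by
  have e1 := pop1_length p q (pop1 p q).1 (pop1 p q).2.1 (pop1 p q).2.2 (by omega) rfl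
  have e2 := pop1_length (pop1 p q).2.1 (pop1 p q).2.2
    (pop1 (pop1 p q).2.1 (pop1 p q).2.2).1 (pop1 (pop1 p q).2.1 (pop1 p q).2.2).2.1
    (pop1 (pop1 p q).2.1 (pop1 p q).2.2).2.2 (by omega) rfl
  simp only [List.length_append, List.length_cons, List.length_nil]
  omega

-- PySem.List.min? with identity key returns exactly the minimum value
theorem min?_eq_of (s : List Int) (m : Int) (h1 : m ∈ s) (h2 : ∀ y ∈ s, m ≤ y) :
    PySem.List.min? s (fun x => x) = some m := by
  match hm : PySem.List.min? s (fun x => x) with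
  | none =>
      have := (PySem.List.min?_eq_none_iff _ _).1 hm
      subst this; simp at h1
  | some v =>
      have hmem : v ∈ s := PySem.List.min?_mem hm
      have hmin : m ≤ v := h2 v hmem
      have hmin' : v ≤ m := by have := PySem.List.min?_isMin hm m h1; simpa using this
      exact congrArg some (le_antisymm hmin' hmin)

-- pop1 on two sorted lists removes a minimum, from the front of p or of q
theorem pop1_spec (p q : List Int) (f : Int) (p1 q1 : List Int)
    (hp : p.Pairwise (fun a b : Int => a ≤ b)) (hq : q.Pairwise (fun a b : Int => a ≤ b))
    (hne : 1 ≤ p.length + q.length) (heq : pop1 p q = (f, p1, q1)) :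
    ((p = f :: p1 ∧ q1 = q) ∨ (q = f :: q1 ∧ p1 = p)) ∧ ∀ y ∈ p ++ q, f ≤ y := by
  match p, q with
  | a :: p', [] =>
    simp only [pop1, Prod.mk.injEq] at heq
    obtain ⟨h0, h1, h2⟩ := heq; subst h0; subst h1; subst h2
    refine ⟨Or.inl ⟨rfl, rfl⟩, ?_⟩
    intro y hy
    simp only [List.append_nil, List.mem_cons] at hy
    rcases hy with h | h
    · omega
    · exact (List.pairwise_cons.1 hp).1 y h
  | [], b :: q' =>
    simp only [pop1, Prod.mk.injEq] at heq
    obtain ⟨h0, h1, h2⟩ := heq; subst h0; subst h1; subst h2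
    refine ⟨Or.inr ⟨rfl, rfl⟩, ?_⟩
    intro y hy
    simp only [List.nil_append, List.mem_cons] at hy
    rcases hy with h | h
    · omega
    · exact (List.pairwise_cons.1 hq).1 y h
  | a :: p', b :: q' =>
    simp only [pop1] at heq
    split at heq <;> rename_i hab <;> simp only [Prod.mk.injEq] at heq <;>
      obtain ⟨h0, h1, h2⟩ := heq <;> subst h0 <;> subst h1 <;> subst h2
    · refine ⟨Or.inl ⟨rfl, rfl⟩, ?_⟩
      intro y hy
      simp only [List.mem_append, List.mem_cons] at hy
      rcases hy with (h | h) | (h | h)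
      · omega
      · exact (List.pairwise_cons.1 hp).1 y h
      · omega
      · have := (List.pairwise_cons.1 hq).1 y h; omega
    · refine ⟨Or.inr ⟨rfl, rfl⟩, ?_⟩
      intro y hy
      simp only [List.mem_append, List.mem_cons] at hy
      rcases hy with (h | h) | (h | h)
      · omega
      · have := (List.pairwise_cons.1 hp).1 y h; omega
      · omega
      · exact (List.pairwise_cons.1 hq).1 y h
  | [], [] => simp at hne

-- The main invariant lemma: A's heap loop on the multiset s equals B's two-queue loop,
-- provided p and q are sorted, p ++ q is a permutation of s, and every element of q
-- is at most three times every element of p and at most three times any later element of q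
-- (which is what keeps q sorted when a new mix is appended at its back).
theorem loop_eq (n : Nat) (s p q : List Int) (K ans : Int)
    (hn : p.length + q.length ≤ n)
    (hperm : (p ++ q).Perm s)
    (hp : p.Pairwise (fun a b : Int => a ≤ b))
    (hq : q.Pairwise (fun a b : Int => a ≤ b ∧ b ≤ 3 * a))
    (hpq : ∀ x ∈ p, ∀ y ∈ q, y ≤ 3 * x)
    (hne : s ≠ []) :
    loopA s K ans = loopC p q K ans := by
  induction n generalizing s p q ans with
  | zero =>
    have h0 : p.length + q.length = 0 := by omega
    have : s.length = 0 := by have := hperm.length_eq; simp at this; omega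
    exact absurd (List.length_eq_zero_iff.1 this) hne
  | succ n ih =>
    have hqle : q.Pairwise (fun a b : Int => a ≤ b) := hq.imp (fun h => h.1)
    have hlen : s.length = p.length + q.length := by
      have := hperm.length_eq; simp at this; omega
    by_cases h2 : 2 ≤ p.length + q.length
    · -- loop body fires
      obtain ⟨f, p1, q1, hpop1⟩ : ∃ f p1 q1, pop1 p q = (f, p1, q1) :=
        ⟨_, _, _, rfl⟩
      obtain ⟨hdisj1, hmin1⟩ := pop1_spec p q f p1 q1 hp hqle (by omega) hpop1
      -- f is a member of p ++ q, hence of s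
      have hfmem : f ∈ p ++ q := by
        rcases hdisj1 with ⟨h1, _⟩ | ⟨h1, _⟩
        · rw [h1]; simp
        · rw [h1]; simp
      have hperm1 : (p ++ q).Perm (f :: (p1 ++ q1)) := by
        rcases hdisj1 with ⟨h1, h2'⟩ | ⟨h1, h2'⟩
        · subst h2'; rw [h1]; simp
        · subst h2'; rw [h1]; exact List.perm_middle
      have hma : PySem.List.min? s (fun x => x) = some f :=
        min?_eq_of s f (hperm.mem_iff.1 hfmem)
          (fun y hy => hmin1 y (hperm.mem_iff.2 hy))
      -- sizes
      have hlens : 2 ≤ s.length := by omega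
      have hlen1 : p1.length + q1.length + 1 = p.length + q.length :=
        pop1_length p q f p1 q1 (by omega) hpop1
      -- unfold both loops
      rw [loopA, dif_pos hlens, hma, loopC, dif_pos h2]
      simp only [hpop1]
      by_cases hK : f < K
      · rw [if_pos hK, if_neg (by omega)]
        -- second pop
        have hp1 : p1.Pairwise (fun a b : Int => a ≤ b) := by
          rcases hdisj1 with ⟨h1, _⟩ | ⟨_, h1⟩
          · rw [h1] at hp; exact (List.pairwise_cons.1 hp).2
          · rw [h1]; exact hp
        have hq1' : q1.Pairwise (fun a b : Int => a ≤ b ∧ b ≤ 3 * a) := by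
          rcases hdisj1 with ⟨_, h1⟩ | ⟨h1, _⟩
          · rw [h1]; exact hq
          · rw [h1] at hq; exact (List.pairwise_cons.1 hq).2
        have hq1le : q1.Pairwise (fun a b : Int => a ≤ b) := hq1'.imp (fun h => h.1)
        obtain ⟨s2, p2, q2, hpop2⟩ : ∃ s2 p2 q2, pop1 p1 q1 = (s2, p2, q2) :=
          ⟨_, _, _, rfl⟩
        obtain ⟨hdisj2, hmin2⟩ := pop1_spec p1 q1 s2 p2 q2 hp1 hq1le (by omega) hpop2
        have hs2mem : s2 ∈ p1 ++ q1 := by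
          rcases hdisj2 with ⟨h1, _⟩ | ⟨h1, _⟩
          · rw [h1]; simp
          · rw [h1]; simp
        have hperm2 : (p1 ++ q1).Perm (s2 :: (p2 ++ q2)) := by
          rcases hdisj2 with ⟨h1, h2'⟩ | ⟨h1, h2'⟩
          · subst h2'; rw [h1]; simp
          · subst h2'; rw [h1]; exact List.perm_middle
        -- s.erase f is a permutation of p1 ++ q1
        have hpermE : (p1 ++ q1).Perm (s.erase f) := by
          have h1 : ((f :: (p1 ++ q1)).erase f).Perm (s.erase f) :=
            (hperm1.symm.trans hperm).erase f
          simpa using h1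
        have hmb : PySem.List.min? (s.erase f) (fun x => x) = some s2 :=
          min?_eq_of _ s2 (hpermE.mem_iff.1 hs2mem)
            (fun y hy => hmin2 y (hpermE.mem_iff.2 hy))
        rw [hmb]
        simp only [hpop2]
        -- properties of the new state
        have hfs2 : f ≤ s2 := hmin1 s2 (hperm1.mem_iff.2 (by simp [hs2mem]))
        set m : Int := f + s2 * 2 with hm
        -- membership transfers into the old lists
        have hsubp : ∀ x ∈ p2, x ∈ p1 := by
          rcases hdisj2 with ⟨h1, _⟩ | ⟨_, h1⟩
          · rw [h1]; intro x hx; simp [hx]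
          · rw [h1]; intro x hx; exact hx
        have hsubq : ∀ x ∈ q2, x ∈ q1 := by
          rcases hdisj2 with ⟨_, h1⟩ | ⟨h1, _⟩
          · rw [h1]; intro x hx; exact hx
          · rw [h1]; intro x hx; simp [hx]
        have hsubp1 : ∀ x ∈ p1, x ∈ p := by
          rcases hdisj1 with ⟨h1, _⟩ | ⟨_, h1⟩
          · rw [h1]; intro x hx; simp [hx]
          · rw [h1]; intro x hx; exact hx
        have hsubq1 : ∀ x ∈ q1, x ∈ q := by
          rcases hdisj1 with ⟨_, h1⟩ | ⟨h1, _⟩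
          · rw [h1]; intro x hx; exact hx
          · rw [h1]; intro x hx; simp [hx]
        -- every survivor is ≥ s2
        have hge2 : ∀ x ∈ p2 ++ q2, s2 ≤ x := by
          intro x hx
          apply hmin2
          rcases List.mem_append.1 hx with h | h
          · exact List.mem_append.2 (Or.inl (hsubp x h))
          · exact List.mem_append.2 (Or.inr (hsubq x h))
        -- every old q-element is ≤ 3 * f
        have hq3f : ∀ y ∈ q1, y ≤ 3 * f := by
          rcases hdisj1 with ⟨h1, h2'⟩ | ⟨h1, _⟩
          · -- f came from p
            subst h2'
            intro y hy
            exact hpq f (by rw [h1]; simp) y hy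
          · -- f is the head of q
            intro y hy
            have := (List.pairwise_cons.1 (h1 ▸ hq)).1 y hy
            exact this.2
        -- invariants for the recursive call
        have hperm' : (p2 ++ (q2 ++ [m])).Perm (((s.erase f).erase s2) ++ [m]) := by
          have hpermE2 : (p2 ++ q2).Perm ((s.erase f).erase s2) := by
            have h1 : ((s2 :: (p2 ++ q2)).erase s2).Perm ((s.erase f).erase s2) :=
              (hperm2.symm.trans hpermE).erase s2
            simpa using h1
          rw [← List.append_assoc]
          exact hpermE2.append_right [m]
        have hp2' : p2.Pairwise (fun a b : Int => a ≤ b) := by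
          rcases hdisj2 with ⟨h1, _⟩ | ⟨_, h1⟩
          · rw [h1] at hp1; exact (List.pairwise_cons.1 hp1).2
          · rw [h1]; exact hp1
        have hq2' : q2.Pairwise (fun a b : Int => a ≤ b ∧ b ≤ 3 * a) := by
          rcases hdisj2 with ⟨_, h1⟩ | ⟨h1, _⟩
          · rw [h1]; exact hq1'
          · rw [h1] at hq1'; exact (List.pairwise_cons.1 hq1').2
        have hmle : ∀ y ∈ q2, y ≤ m ∧ m ≤ 3 * y := by
          intro y hy
          have hy1 : y ∈ q1 := hsubq y hy
          have h3f : y ≤ 3 * f := hq3f y hy1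
          have hys : s2 ≤ y := hge2 y (List.mem_append.2 (Or.inr hy))
          constructor
          · omega
          · omega
        have hq' : (q2 ++ [m]).Pairwise (fun a b : Int => a ≤ b ∧ b ≤ 3 * a) := by
          rw [List.pairwise_append]
          refine ⟨hq2', by simp, ?_⟩
          intro a ha b hb
          simp only [List.mem_singleton] at hb
          subst hb
          exact hmle a ha
        have hpq' : ∀ x ∈ p2, ∀ y ∈ q2 ++ [m], y ≤ 3 * x := by
          intro x hx y hy
          rcases List.mem_append.1 hy with h | h
          · exact hpq x (hsubp1 x (hsubp x hx)) y (hsubq1 y (hsubq y h))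
          · simp only [List.mem_singleton] at h
            subst h
            have := hge2 x (List.mem_append.2 (Or.inl hx))
            omega
        have hn' : p2.length + (q2 ++ [m]).length ≤ n := by
          have hlen2 : p2.length + q2.length + 1 = p1.length + q1.length :=
            pop1_length p1 q1 s2 p2 q2 (by omega) hpop2
          simp only [List.length_append, List.length_cons, List.length_nil]
          omega
        exact ih _ _ _ _ hn' hperm' hp2' hq' hpq' (by simp)
      · rw [if_neg hK, if_pos (by omega), if_pos (by omega)]
    · -- 0 or 1 elements: final check
      have h1 : p.length + q.length = 1 := by
        have hne' : s.length ≠ 0 := fun h => hne (List.length_eq_zero_iff.1 h)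
        omega
      obtain ⟨x, hx⟩ : ∃ x, p ++ q = [x] := by
        have : (p ++ q).length = 1 := by simp; omega
        match hpq' : p ++ q with
        | [x] => exact ⟨x, rfl⟩
        | [] => rw [hpq'] at this; simp at this
        | a :: b :: t => rw [hpq'] at this; simp at this
      have hs : s = [x] := by
        have := hx ▸ hperm
        exact (List.perm_singleton.1 this.symm).symm ▸ rfl
      subst hs
      rw [loopA, dif_neg (by simp)]
      rw [loopC, dif_neg (by omega), hx]
      have hmx : PySem.List.min? [x] (fun y => y) = some x :=
        min?_eq_of [x] x (by simp) (by intro y hy; simp at hy; omega)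
      simp only [hmx]

-- pop1 on the pointer suffixes is exactly B's pick-the-smaller-front conditional
theorem pop1_drop (p q : List Int) (i j : Nat) (hi : i ≤ p.length) (hj : j ≤ q.length)
    (hne : i < p.length ∨ j < q.length) :
    pop1 (p.drop i) (q.drop j) =
      if i < p.length ∧ (q.length ≤ j ∨ p.getD i 0 ≤ q.getD j 0)
      then (p.getD i 0, p.drop (i+1), q.drop j)
      else (q.getD j 0, p.drop i, q.drop (j+1)) := by
  by_cases hip : i < p.length
  · have hdp : p.drop i = p.getD i 0 :: p.drop (i+1) := by
      rw [List.getD_eq_getElem p 0 hip]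
      exact List.drop_eq_getElem_cons hip
    by_cases hjq : j < q.length
    · have hdq : q.drop j = q.getD j 0 :: q.drop (j+1) := by
        rw [List.getD_eq_getElem q 0 hjq]
        exact List.drop_eq_getElem_cons hjq
      rw [hdp, hdq]
      by_cases hle : p.getD i 0 ≤ q.getD j 0
      · rw [if_pos ⟨hip, Or.inr hle⟩]
        simp [pop1]
        simpa [List.getD_eq_getElem?_getD] using hle
      · rw [if_neg (by omega)]
        simp [pop1]
        simp only [List.getD_eq_getElem?_getD] at hle
        omega
    · have hje : j = q.length := by omega
      have hdq : q.drop j = [] := by rw [hje]; simp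
      rw [if_pos ⟨hip, Or.inl (by omega)⟩, hdp, hdq]
      simp [pop1]
  · have hie : i = p.length := by omega
    have hdp : p.drop i = [] := by rw [hie]; simp
    have hjq : j < q.length := by omega
    have hdq : q.drop j = q.getD j 0 :: q.drop (j+1) := by
      rw [List.getD_eq_getElem q 0 hjq]
      exact List.drop_eq_getElem_cons hjq
    rw [if_neg (by omega), hdp, hdq]
    simp [pop1]

-- B's indexed loop equals the list-suffix model
theorem pick_bounds (p q : List Int) (i j : Nat) (hi : i ≤ p.length) (hj : j ≤ q.length)
    (hne : i < p.length ∨ j < q.length) :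
    (pick p q i j).2.1 ≤ p.length ∧ (pick p q i j).2.2 ≤ q.length := by
  unfold pick; split <;> simp <;> omega

-- pop1 on the pointer suffixes is exactly B's pop_smallest step
theorem pop1_pick (p q : List Int) (i j : Nat) (hi : i ≤ p.length) (hj : j ≤ q.length)
    (hne : i < p.length ∨ j < q.length) :
    pop1 (p.drop i) (q.drop j) =
      ((pick p q i j).1, p.drop (pick p q i j).2.1, q.drop (pick p q i j).2.2) := by
  rw [pop1_drop p q i j hi hj hne]
  unfold pick
  split
  · simp
  · simp

-- B's indexed loop equals the list-suffix model
theorem loopB_eq_loopC (n : Nat) (p q : List Int) (i j : Nat) (K ans : Int)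
    (hn : p.length + q.length - i - j ≤ n) (hi : i ≤ p.length) (hj : j ≤ q.length) :
    loopB p q i j K ans = loopC (p.drop i) (q.drop j) K ans := by
  induction n generalizing q i j ans with
  | zero =>
    have h0 : ¬ 2 ≤ ((p.length : Int) - i) + ((q.length : Int) - j) := by omega
    have h0' : ¬ 2 ≤ (p.drop i).length + (q.drop j).length := by
      simp only [List.length_drop]; omega
    rw [loopB, dif_neg h0, loopC, dif_neg h0']
  | succ n ih =>
    by_cases h2 : 2 ≤ ((p.length : Int) - i) + ((q.length : Int) - j)
    · have h2' : 2 ≤ (p.drop i).length + (q.drop j).length := by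
        simp only [List.length_drop]; omega
      have hb1 := pick_bounds p q i j hi hj (by omega)
      have hs1 := pick_sum p q i j
      have hd1 := pop1_pick p q i j hi hj (by omega)
      rw [loopB, dif_pos h2, loopC, dif_pos h2']
      simp only [hd1]
      by_cases hK : (pick p q i j).1 ≥ K
      · rw [if_pos hK, if_pos hK]
      · rw [if_neg hK, if_neg hK]
        have hb2 := pick_bounds p q (pick p q i j).2.1 (pick p q i j).2.2 hb1.1 hb1.2 (by omega)
        have hs2 := pick_sum p q (pick p q i j).2.1 (pick p q i j).2.2
        have hd2 := pop1_pick p q (pick p q i j).2.1 (pick p q i j).2.2 hb1.1 hb1.2 (by omega)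
        simp only [hd2]
        rw [ih (q ++ [(pick p q i j).1 + (pick p q (pick p q i j).2.1 (pick p q i j).2.2).1 * 2])
          (pick p q (pick p q i j).2.1 (pick p q i j).2.2).2.1
          (pick p q (pick p q i j).2.1 (pick p q i j).2.2).2.2
          (ans + 1) (by simp; omega) (by omega) (by simp; omega)]
        rw [List.drop_append_of_le_length hb2.2]
    · have h2' : ¬ 2 ≤ (p.drop i).length + (q.drop j).length := by
        simp only [List.length_drop]; omega
      rw [loopB, dif_neg h2, loopC, dif_neg h2']

theorem solution_eq (scoville : List Int) (K : Int) (hne : scoville ≠ []) :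
    solution scoville K = solution_alt scoville K := by
  unfold solution solution_alt
  rw [loopB_eq_loopC (PySem.List.sorted scoville (fun x => x) false).length
    (PySem.List.sorted scoville (fun x => x) false) [] 0 0 K 0
    (by simp) (by omega) (by simp)]
  simp only [List.drop_nil, List.drop_zero]
  exact loop_eq scoville.length scoville (PySem.List.sorted scoville (fun x => x) false) [] K 0
    (by simp [(PySem.List.sorted_perm scoville (fun x => x) false).length_eq])
    (by simpa using (PySem.List.sorted_perm scoville (fun x => x) false))
    (by simpa using PySem.List.sorted_pairwise scoville (fun x => x))
    (by simp)
    (by simp)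
    hne

-- ===== VERDICT (by name: the statement is the Claim_ definition above) =====
theorem solution_spec : Claim_equal_solution := by
  intro scoville K _ hpre
  unfold Spec_solution
  exact solution_eq scoville K hpre
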